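-- pv_equiv track=rewrite | github.com/cjw020607/Coding_Test | 프로그래머스/1/135808. 과일 장수/과일 장수.py | solution
-- ===== SOURCE A (Python) =====
-- def solution(k, m, score):
--     score.sort(reverse=True)
--     l=len(score)
--     result=0
--     for i in range(0,l,m):
--         if i+m>l:
--             break
--         result+=min(score[i:i+m])*m
--     return result
-- ===== SOURCE B (Python) =====
-- def solution(k, m, score):
--     # Same in-place descending sort as A (the caller observes that mutation);
--     # then work on the ascending view: drop the leftover smallest elements
--     # (the partial group A's break skips) and recursively pick each group's
--     # head, which is its minimum in an ascending list.
--     score.sort(reverse=True)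
--     asc = list(reversed(score))
--
--     def go(rest):
--         if len(rest) < m:
--             return 0
--         return rest[0] + go(rest[m:])
--
--     return m * go(asc[len(asc) % m:])
-- ===== Notes on version B (the rewrite author's own statement) =====
-- stated objective: alternative
-- what changed: instead of slicing each descending window and taking min() in an index loop, B reverses to the ascending view, drops the leftover partial group up front (len % m), and a recursive helper consumes the list m at a time summing each chunk's head
-- outside the precondition, e.g. on solution(0, -2, [2, 1]): A returns 0, B does not finish within the time limit
import Mathlib
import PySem

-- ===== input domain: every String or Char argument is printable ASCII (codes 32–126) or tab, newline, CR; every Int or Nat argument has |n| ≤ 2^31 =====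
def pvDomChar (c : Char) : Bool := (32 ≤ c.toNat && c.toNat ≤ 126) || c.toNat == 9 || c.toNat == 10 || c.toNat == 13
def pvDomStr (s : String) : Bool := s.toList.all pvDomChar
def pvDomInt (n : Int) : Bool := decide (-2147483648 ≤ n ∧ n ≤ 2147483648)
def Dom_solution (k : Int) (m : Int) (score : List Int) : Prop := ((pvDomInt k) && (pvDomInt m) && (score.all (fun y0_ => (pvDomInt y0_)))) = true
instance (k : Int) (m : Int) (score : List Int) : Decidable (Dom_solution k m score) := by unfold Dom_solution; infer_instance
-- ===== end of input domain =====

-- B replaces A's index loop (slice each descending window, take min()) by sorting,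
-- reversing to the ascending view, dropping the leftover partial group (len % m) and
-- recursively summing each m-chunk's head (objective: alternative decomposition).
-- Both A and B sort `score` in place descending; the equivalence proved is about the return value.

-- ===== PORT A =====
-- the for-loop over range(0, l, m) with its `break`
def solLoopA (l : Int) (m : Int) (s : List Int) : List Int → Int → Int
  | [], r => r
  | i :: rest, r =>
      if i + m > l then r
      else solLoopA l m s rest
        (r + ((PySem.List.min? (PySem.List.slice s (some i) (some (i + m))) (fun x => x)).getD 0) * m)

def solution (k : Int) (m : Int) (score : List Int) : Int :=
  let s := PySem.List.sorted score (fun x => x) true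
  let l : Int := s.length
  solLoopA l m s (PySem.List.pyRange 0 l m) 0

-- ===== PORT B =====
-- the recursive helper `go` of Source B; fuel = one more than the number of recursive
-- calls ever needed (each call drops m ≥ 1 elements) only makes it total in Lean
def goB (m : Int) : Nat → List Int → Int
  | 0, _ => 0
  | Nat.succ fuel, rest =>
      if (rest.length : Int) < m then 0
      else (PySem.List.pyGet? rest 0).getD 0 + goB m fuel (PySem.List.slice rest (some m) none)

def solution_alt (k : Int) (m : Int) (score : List Int) : Int :=
  let s := PySem.List.sorted score (fun x => x) true
  let asc := s.reverse
  let r := PySem.Int.mod (asc.length : Int) m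
  m * goB m (asc.length + 1) (PySem.List.slice asc (some r) none)

-- ===== PRECONDITION & SPEC =====
-- m = 0 raises in both programs (ValueError from range in A, ZeroDivisionError in B);
-- a negative group size m is outside the task's natural domain (A's value 0 there is an
-- artifact of range(0,l,m) being empty; B's recursion does not terminate), so Pre_ keeps m ≥ 1.
def Pre_solution (k : Int) (m : Int) (score : List Int) : Prop := 1 ≤ m
instance (k : Int) (m : Int) (score : List Int) : Decidable (Pre_solution k m score) := by unfold Pre_solution; infer_instance

def pvWitness_solution : Int × Int × List Int := (0, 2, [1, 4, 2, 3])

def Spec_solution (k : Int) (m : Int) (score : List Int) (out : Int) : Prop := out = solution_alt k m score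
instance (k : Int) (m : Int) (score : List Int) (out : Int) : Decidable (Spec_solution k m score out) := by unfold Spec_solution; infer_instance

-- ===== CLAIM (what is proved, stated in full; the proofs are below) =====
def Claim_equal_solution : Prop := ∀ (k : Int) (m : Int) (score : List Int), Dom_solution k m score → Pre_solution k m score → Spec_solution k m score (solution k m score)

-- ===== LEMMAS AND PROOFS =====

theorem pyRange_pos_nil (a b s : Int) (h : 0 < s) (hab : b ≤ a) : PySem.List.pyRange a b s = [] := by
  rw [PySem.List.pyRange_of_pos _ _ h]
  simp [if_neg (not_lt.mpr hab)]

theorem pyRange_pos_cons (a b s : Int) (h : 0 < s) (hab : a < b) :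
    PySem.List.pyRange a b s = a :: PySem.List.pyRange (a + s) b s := by
  rw [PySem.List.pyRange_of_pos _ _ h, PySem.List.pyRange_of_pos _ _ h]
  have hnum : 0 ≤ b - (a + s) + s - 1 := by omega
  have hdiv : (b - a + s - 1) / s = (b - (a + s) + s - 1) / s + 1 := by
    rw [show b - a + s - 1 = (b - (a + s) + s - 1) + 1 * s by ring]
    rw [Int.add_mul_ediv_right _ _ (by omega)]
  have h2 : 0 ≤ (b - (a + s) + s - 1) / s := Int.ediv_nonneg hnum (le_of_lt h)
  have hn : ((b - a + s - 1) / s).toNat = ((b - (a + s) + s - 1) / s).toNat + 1 := by omega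
  rw [if_pos hab, hn]
  by_cases hc : a + s < b
  · rw [if_pos hc, List.range_succ_eq_map, List.map_cons, List.map_map]
    congr 1
    · simp
    · apply List.map_congr_left; intro k _; simp; ring
  · rw [if_neg hc]
    have : (b - (a + s) + s - 1) / s = 0 := Int.ediv_eq_zero_of_lt hnum (by omega)
    rw [this]; simp

-- minimum of a full window of a descending list is its last element
theorem min_slice_desc (s : List Int) (hs : s.Pairwise (fun a b => b ≤ a))
    (i m : Int) (hi : 0 ≤ i) (hm : 1 ≤ m) (hl : i + m ≤ (s.length : Int)) :
    (PySem.List.min? (PySem.List.slice s (some i) (some (i + m))) (fun x => x)).getD 0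
      = PySem.List.pyGetD s (i + m - 1) 0 := by
  have hb : 0 ≤ i + m := by omega
  rw [PySem.List.slice_toNat s hi hb]
  set T := List.take ((i + m).toNat - i.toNat) (List.drop i.toNat s) with hT
  have hlen : T.length = (i + m).toNat - i.toNat := by
    simp [hT]; omega
  have hmono : ∀ (p q : Nat) (hp : p < s.length) (hq : q < s.length), p ≤ q → s[q] ≤ s[p] := by
    intro p q hp hq hpq
    rcases Nat.lt_or_ge p q with h' | h'
    · exact (List.pairwise_iff_getElem.mp hs) p q hp hq h'
    · have : p = q := by omega
      subst this; exact le_refl _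
  have hTget : ∀ (t : Nat) (ht : t < T.length), T[t] = s[i.toNat + t]'(by omega) := by
    intro t ht
    simp [hT, List.getElem_take, List.getElem_drop]
  have hlast_lt : i.toNat + (m.toNat - 1) < s.length := by omega
  have hne : T ≠ [] := by
    intro hnil
    rw [hnil] at hlen; simp at hlen; omega
  obtain ⟨x, hx⟩ : ∃ x, PySem.List.min? T (fun x => x) = some x := by
    cases hmin : PySem.List.min? T (fun x => x) with
    | none => exact absurd ((PySem.List.min?_eq_none_iff (xs := T) (key := fun x => x)).mp hmin) hne
    | some x => exact ⟨x, rfl⟩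
  have hxmem := PySem.List.min?_mem hx
  obtain ⟨t, ht, hxt⟩ := List.mem_iff_getElem.mp hxmem
  have hxval : s[i.toNat + (m.toNat - 1)] ≤ x := by
    rw [← hxt, hTget t ht]
    exact hmono _ _ (by omega) (by omega) (by omega)
  have hlastmem : s[i.toNat + (m.toNat - 1)] ∈ T := by
    rw [List.mem_iff_getElem]
    exact ⟨m.toNat - 1, by omega, by rw [hTget _ (by omega)]⟩
  have hxle : x ≤ s[i.toNat + (m.toNat - 1)] := PySem.List.min?_isMin hx _ hlastmem
  have : x = s[i.toNat + (m.toNat - 1)] := le_antisymm hxle hxval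
  rw [hx, Option.getD_some, this,
      PySem.List.pyGetD_eq_getElem s 0 (by omega) (by omega)]
  congr 1
  omega

-- the loop of A, started at any a ≥ 0, equals r + m * (strided sum from a+m-1)
theorem solLoopA_eq (m : Int) (hm : 1 ≤ m) (s : List Int)
    (hs : s.Pairwise (fun a b => b ≤ a)) :
    ∀ (n : Nat) (a r : Int), 0 ≤ a → ((s.length : Int) - a).toNat ≤ n →
      solLoopA (s.length) m s (PySem.List.pyRange a (s.length) m) r
        = r + m * ((PySem.List.pyRange (a + m - 1) (s.length) m).map
            (fun j => PySem.List.pyGetD s j 0)).sum := by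
  intro n
  induction n with
  | zero =>
      intro a r ha hn
      have hla : (s.length : Int) ≤ a := by omega
      rw [pyRange_pos_nil _ _ _ (by omega) hla,
          pyRange_pos_nil _ _ _ (by omega) (by omega)]
      simp [solLoopA]
  | succ n ih =>
      intro a r ha hn
      by_cases hla : (s.length : Int) ≤ a
      · rw [pyRange_pos_nil _ _ _ (by omega) hla,
            pyRange_pos_nil _ _ _ (by omega) (by omega)]
        simp [solLoopA]
      · rw [not_le] at hla
        rw [pyRange_pos_cons _ _ _ (by omega) hla]
        simp only [solLoopA]
        by_cases hbr : a + m > (s.length : Int)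
        · rw [if_pos hbr, pyRange_pos_nil _ _ _ (by omega) (by omega)]
          simp
        · rw [if_neg hbr]
          rw [ih (a + m) _ (by omega) (by omega)]
          rw [pyRange_pos_cons (a + m - 1) _ _ (by omega) (by omega)]
          rw [min_slice_desc s hs a m ha hm (by omega)]
          simp only [List.map_cons, List.sum_cons]
          have : a + m - 1 + m = a + m + m - 1 := by ring
          rw [this]
          ring

-- the strided range starting at m-1 written out as List.range of the group count
theorem rangeA_eq (m l : Int) (hm : 1 ≤ m) (hl : 0 ≤ l) :
    PySem.List.pyRange (m - 1) l m
      = (List.range (l / m).toNat).map (fun (k : Nat) => (m - 1) + m * (k : Int)) := by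
  rw [PySem.List.pyRange_of_pos _ _ (by omega : (0:Int) < m)]
  by_cases hc : m - 1 < l
  · rw [if_pos hc]
    have : l - (m - 1) + m - 1 = l := by ring
    rw [this]
  · rw [if_neg hc]
    have : l / m = 0 := Int.ediv_eq_zero_of_lt hl (by omega)
    rw [this]
    simp

theorem getElem_idx_congr (l : List Int) (a b : Nat) (h : a = b)
    (ha : a < l.length) : l[a] = l[b]'(h ▸ ha) := by subst h; rfl

-- goB on a list whose length is exactly c groups of m sums the c chunk heads
theorem goB_eq (m : Int) (hm : 1 ≤ m) :
    ∀ (c : Nat), ∀ (fuel : Nat) (t : List Int), t.length = c * m.toNat → c < fuel →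
      goB m fuel t = ∑ i ∈ Finset.range c, t.getD (i * m.toNat) 0 := by
  intro c
  induction c with
  | zero =>
      intro fuel t hlen hf
      obtain ⟨f, rfl⟩ : ∃ f, fuel = f + 1 := ⟨fuel - 1, by omega⟩
      have ht : t = [] := List.eq_nil_of_length_eq_zero (by omega)
      subst ht
      simp only [goB]
      rw [if_pos (by simpa using (by omega : (0:Int) < m))]
      simp
  | succ c ih =>
      intro fuel t hlen hf
      obtain ⟨f, rfl⟩ : ∃ f, fuel = f + 1 := ⟨fuel - 1, by omega⟩
      have hmn : 1 ≤ m.toNat := by omega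
      have hlt : ¬ ((t.length : Int) < m) := by
        rw [hlen]; push_cast; nlinarith [Int.toNat_of_nonneg (by omega : (0:Int) ≤ m)]
      simp only [goB, if_neg hlt]
      rw [PySem.List.slice_from t (by omega : (0:Int) ≤ m)]
      have hdlen : (t.drop m.toNat).length = c * m.toNat := by
        simp [hlen]; ring_nf; omega
      rw [ih f _ hdlen (by omega)]
      rw [Finset.sum_range_succ']
      have hhead : (PySem.List.pyGet? t 0).getD 0 = t.getD 0 0 := by
        rw [PySem.List.pyGet?_zero]
        simp [List.getD]
      rw [hhead, Nat.zero_mul, add_comm]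
      congr 1
      apply Finset.sum_congr rfl
      intro x _
      have hshift : (t.drop m.toNat).getD (x * m.toNat) 0 = t.getD ((x + 1) * m.toNat) 0 := by
        simp [List.getD, List.getElem?_drop]
        congr 1
        ring
      exact hshift

-- ===== VERDICT (by name: the statement is the Claim_ definition above) =====
theorem solution_spec : Claim_equal_solution := by
  intro k m score _ hm
  unfold Pre_solution at hm
  unfold Spec_solution solution solution_alt
  simp only
  set s := PySem.List.sorted score (fun x => x) true with hsdef
  have hs := PySem.List.sorted_pairwise_rev score (fun x => x)
  rw [← hsdef] at hs
  -- A's value: m times the sum of the window minima, indices m-1, 2m-1, ...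
  rw [solLoopA_eq m hm s hs ((s.length : Int) - 0).toNat 0 0 le_rfl le_rfl]
  rw [show (0:Int) + m - 1 = m - 1 by ring]
  rw [rangeA_eq m (s.length : Int) hm (by positivity), List.map_map]
  -- B's value: unfold mod and the slice, then apply goB_eq
  have hmod : PySem.Int.mod ((s.reverse.length : Int)) m = (s.length : Int) % m := by
    rw [PySem.Int.mod_eq_emod_of_pos (by omega)]
    simp
  rw [hmod, PySem.List.slice_from _ (Int.emod_nonneg _ (by omega))]
  set mn : Nat := m.toNat with hmn
  have hmc : (mn : Int) = m := Int.toNat_of_nonneg (by omega)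
  have hmn1 : 1 ≤ mn := by omega
  set qn : Nat := (((s.length : Int)) / m).toNat with hqn
  set rn : Nat := (((s.length : Int)) % m).toNat with hrn
  have hqc : (qn : Int) = (s.length : Int) / m :=
    Int.toNat_of_nonneg (Int.ediv_nonneg (by positivity) (by omega))
  have hrc : (rn : Int) = (s.length : Int) % m :=
    Int.toNat_of_nonneg (Int.emod_nonneg _ (by omega))
  have hrm : ((s.length : Int)) % m < m := Int.emod_lt_of_pos _ (by omega)
  have hsplit : s.length = qn * mn + rn := by
    have h1 : ((qn * mn + rn : Nat) : Int) = (s.length : Int) := by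
      push_cast
      rw [hqc, hrc, hmc]
      exact Int.ediv_add_emod' _ _
    exact_mod_cast h1.symm
  set t : List Int := s.reverse.drop rn with hT
  have htlen : t.length = qn * mn := by
    simp [hT]
    omega
  have hqfuel : qn < s.reverse.length + 1 := by
    have : qn ≤ qn * mn := Nat.le_mul_of_pos_right qn (by omega)
    simp
    omega
  rw [goB_eq m hm qn (s.reverse.length + 1) t htlen hqfuel]
  -- the two sums are equal: B's chunk heads are A's window minima read back to front
  have hlistsum : ∀ (n : Nat) (f : Nat → Int),
      ((List.range n).map f).sum = ∑ i ∈ Finset.range n, f i := by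
    intro n f
    induction n with
    | zero => simp
    | succ n ih => rw [List.range_succ, Finset.sum_range_succ, List.map_append]; simp [ih]
  rw [hlistsum]
  simp only [Function.comp]
  rw [← Finset.sum_range_reflect (fun j => PySem.List.pyGetD s ((m - 1) + m * (j : Int)) 0) qn]
  rw [zero_add]
  congr 1
  apply Finset.sum_congr rfl
  intro i hi
  have hic : i < qn := Finset.mem_range.mp hi
  set j : Nat := qn - 1 - i with hj
  have hij : i + j + 1 = qn := by omega
  have hexp : qn * mn = i * mn + j * mn + mn := by
    rw [← hij]; ring
  have hcomm : mn * j = j * mn := Nat.mul_comm _ _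
  have hslen : s.length = i * mn + j * mn + mn + rn := by omega
  -- the pyGetD index on s is in range
  have hidx : (0:Int) ≤ (m - 1) + m * (j : Int) := by
    have h0 : (0:Int) ≤ (j : Int) := Int.natCast_nonneg j
    nlinarith
  have hidxlt : (m - 1) + m * (j : Int) < (s.length : Int) := by
    rw [← hmc, hslen]
    push_cast
    nlinarith [Int.natCast_nonneg i, Int.natCast_nonneg rn, Int.natCast_nonneg (mn : Nat)]
  rw [PySem.List.pyGetD_eq_getElem s 0 hidx hidxlt]
  -- the getD index on t is in range; push it through drop and reverse
  have himn : i * mn < t.length := by rw [htlen]; omega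
  rw [List.getD_eq_getElem t 0 himn]
  have hdropidx : rn + i * mn < s.reverse.length := by simp; omega
  have h1 : t[i * mn]'himn = s.reverse[rn + i * mn]'hdropidx := by
    simp [hT, List.getElem_drop]
  rw [h1, List.getElem_reverse]
  apply getElem_idx_congr
  -- index arithmetic: len - 1 - (rn + i*mn) = ((m-1) + m*j).toNat
  have htoNat : ((m - 1) + m * (j : Int)).toNat = (mn - 1) + mn * j := by
    rw [← hmc]; push_cast; omega
  rw [htoNat]
  omega
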